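-- pv_equiv track=rewrite | github.com/meghalmodi12/Python | interviews/ordermark.py | solution
-- ===== SOURCE A (Python) =====
-- def solution(times, directions):
--     result = [None for _ in range(len(times))]
--     prevGateState = None
--
--     entryQueue = []
--     exitQueue = []
--
--     for i in range(len(times)):
--         if directions[i] == 0:
--             entryQueue.append([times[i], i])
--         else:
--             exitQueue.append([times[i], i])
--
--     entryQueue.sort(key = lambda x: x[0])
--     exitQueue.sort(key = lambda y: y[0])
--     arrTimes = sorted(list(set(times)))
--
--     tick = arrTimes.pop(0)
--     entryProcessed = 0
--
--     while entryProcessed < len(times):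
--         time, employeeIndex = None, None
--         currentState = ''
--
--         if prevGateState is None:
--             currentState = 'close'
--         else:
--             currentState = prevGateState
--
--         if currentState == 'open':
--             if len(entryQueue) and entryQueue[0][0] <= tick:
--                 time, employeeIndex = entryQueue.pop(0)
--                 prevGateState = 'open'
--             if employeeIndex is None and len(exitQueue) and exitQueue[0][0] <= tick:
--                 time, employeeIndex = exitQueue.pop(0)
--                 prevGateState = 'close'
--         else:
--             if len(exitQueue) and exitQueue[0][0] <= tick:
--                 time, employeeIndex = exitQueue.pop(0)
--                 prevGateState = 'close'
--             if employeeIndex is None and len(entryQueue) and entryQueue[0][0] <= tick: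
--                 time, employeeIndex = entryQueue.pop(0)
--                 prevGateState = 'open'
--
--         if time is None and employeeIndex is None:
--             prevGateState = None
--             if len(arrTimes):
--                 tick = arrTimes.pop(0)
--             else:
--                 tick += 1
--         else:
--             result[employeeIndex] = tick
--             entryProcessed += 1
--             tick += 1
--
--     return result
-- ===== SOURCE B (Python) =====
-- def solution(times, directions):
--     n = len(times)
--     entry = sorted(((times[i], i) for i in range(n) if directions[i] == 0),
--                    key=lambda p: p[0])
--     exits = sorted(((times[i], i) for i in range(n) if directions[i] != 0),
--                    key=lambda p: p[0])
--     res = [None] * n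
--     ei = xi = 0
--     tick = None
--     exit_prio = True
--     while ei < len(entry) or xi < len(exits):
--         cand = []
--         if ei < len(entry):
--             cand.append(entry[ei][0])
--         if xi < len(exits):
--             cand.append(exits[xi][0])
--         nxt = min(cand)
--         if tick is None or nxt > tick:
--             tick = nxt
--             exit_prio = True
--         exit_ready = xi < len(exits) and exits[xi][0] <= tick
--         entry_ready = ei < len(entry) and entry[ei][0] <= tick
--         if exit_ready and (exit_prio or not entry_ready):
--             res[exits[xi][1]] = tick
--             xi += 1
--             exit_prio = True
--         else:
--             res[entry[ei][1]] = tick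
--             ei += 1
--             exit_prio = False
--         tick += 1
--     return res
-- ===== Notes on version B (the rewrite author's own statement) =====
-- stated objective: faster
-- what changed: A simulates the turnstile with O(n) list.pop(0) dequeues and an auxiliary sorted list of all distinct times that the clock walks through (re-sorting and re-scanning state each idle tick); B sorts the entry/exit queues once and runs a single two-pointer scan that jumps the clock directly to the next queued arrival time, with no pop(0) shifting and no arrTimes list.
-- crash fix: On times == [] (any directions) A raises IndexError from arrTimes.pop(0) while B returns []. — e.g. on solution([], []): A raises IndexError, B returns []
import Mathlib
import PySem

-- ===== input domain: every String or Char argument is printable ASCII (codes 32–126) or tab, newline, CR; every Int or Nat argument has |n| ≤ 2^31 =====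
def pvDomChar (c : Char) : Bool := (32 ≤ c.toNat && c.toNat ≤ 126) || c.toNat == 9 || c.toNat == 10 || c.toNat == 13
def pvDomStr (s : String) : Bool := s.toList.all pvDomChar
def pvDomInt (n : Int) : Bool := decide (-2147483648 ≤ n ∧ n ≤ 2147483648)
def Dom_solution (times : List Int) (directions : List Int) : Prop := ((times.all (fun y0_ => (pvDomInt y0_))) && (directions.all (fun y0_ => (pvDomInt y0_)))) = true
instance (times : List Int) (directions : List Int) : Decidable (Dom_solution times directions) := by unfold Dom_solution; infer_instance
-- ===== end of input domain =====

-- B replaces A's pop(0)-based turnstile simulation (which advances the clock through a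
-- sorted list of all distinct times) with a two-pointer scan of the sorted entry/exit
-- queues that jumps the clock directly to the next queued arrival time.

-- ===== PORT A =====

-- 'for i in range(len(times)): append (times[i], i) to entryQueue / exitQueue'
-- (structural recursion on `times` carrying the index i; directions[i] via pyGet?,
-- whose out-of-range default 0 is only reached outside Pre_solution)
def pvBuildA (ts : List Int) (dirs : List Int) (i : Nat) : List (Int × Nat) × List (Int × Nat) :=
  match ts with
  | [] => ([], [])
  | t :: rest =>
    let ex := pvBuildA rest dirs (i + 1)
    if (PySem.List.pyGet? dirs (i : Int)).getD 0 = 0 then ((t, i) :: ex.1, ex.2) else (ex.1, (t, i) :: ex.2)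

-- 'if len(q) and q[0][0] <= tick: time, employeeIndex = q.pop(0)'
def pvTryPop (q : List (Int × Nat)) (tick : Int) : Option ((Int × Nat) × List (Int × Nat)) :=
  match q with
  | (t, j) :: r => if t ≤ tick then some ((t, j), r) else none
  | [] => none

-- the body of A's loop that picks who crosses: entry queue first if the gate is 'open',
-- exit queue first otherwise; returns (employeeIndex, new gate state is 'open', new queues)
def pvSelA (isOpen : Bool) (eQ xQ : List (Int × Nat)) (tick : Int) :
    Option (Nat × Bool × List (Int × Nat) × List (Int × Nat)) :=
  if isOpen then
    match pvTryPop eQ tick with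
    | some ((_, j), e') => some (j, true, e', xQ)
    | none =>
      match pvTryPop xQ tick with
      | some ((_, j), x') => some (j, false, eQ, x')
      | none => none
  else
    match pvTryPop xQ tick with
    | some ((_, j), x') => some (j, false, eQ, x')
    | none =>
      match pvTryPop eQ tick with
      | some ((_, j), e') => some (j, true, e', xQ)
      | none => none

-- idle step bookkeeping: 'if len(arrTimes): tick = arrTimes.pop(0) else: tick += 1'
def pvIdleNext (arr : List Int) (tick : Int) : List Int × Int :=
  match arr with
  | a :: arest => (arest, a)
  | [] => ([], tick + 1)

-- A's while loop.  st : Option Bool is prevGateState ('open' ↦ some true, 'close' ↦ some false,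
-- None ↦ none); currentState == 'open' is (st == some true).  fuel is only a totality guard:
-- solution passes more fuel than the loop can iterate (one step per person plus one per
-- arrTimes element; the 'arrTimes exhausted, tick += 1' idle branch is unreachable from
-- solution's initial state — both proved inside pvLoopA_eq_pvLoopB below).
def pvLoopA : Nat → List (Int × Nat) → List (Int × Nat) → List Int → Int →
    Option Bool → Nat → Nat → List Int → List Int
  | 0, _, _, _, _, _, _, _, res => res
  | f + 1, eQ, xQ, arr, tick, st, processed, total, res =>
    if processed < total then
      match pvSelA (st == some true) eQ xQ tick with
      | none =>
        pvLoopA f eQ xQ (pvIdleNext arr tick).1 (pvIdleNext arr tick).2 none processed total res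
      | some (j, isOp, e', x') =>
        pvLoopA f e' x' arr (tick + 1) (some isOp) (processed + 1) total (res.set j tick)
    else res

def solution (times : List Int) (directions : List Int) : List Int :=
  -- result = [None]*len(times): placeholder 0; every slot is assigned before the list is returned
  let res := List.replicate times.length 0
  let ex := pvBuildA times directions 0
  let entryQueue := PySem.List.sorted ex.1 (fun p => p.1) false
  let exitQueue := PySem.List.sorted ex.2 (fun p => p.1) false
  let arrTimes := PySem.List.sorted (PySem.Set.ofList times) (fun x => x) false
  match arrTimes with
  | [] => []   -- Python: arrTimes.pop(0) raises IndexError (times == []); excluded by Pre_solution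
  | tick :: arrRest =>
    pvLoopA (times.length + arrRest.length + 1) entryQueue exitQueue arrRest tick none 0 times.length res

-- ===== PORT B =====

-- 'sorted(((times[i], i) for i in range(n) if directions[i] == 0 / != 0), key=p[0])'
def pvSelectB (ts : List Int) (dirs : List Int) (i : Nat) (wantEntry : Bool) : List (Int × Nat) :=
  match ts with
  | [] => []
  | t :: rest =>
    let tl := pvSelectB rest dirs (i + 1) wantEntry
    if (decide ((PySem.List.pyGet? dirs (i : Int)).getD 0 = 0)) = wantEntry then (t, i) :: tl else tl

-- nxt = min(cand) over the two current queue heads (the loop only runs with a nonempty queue)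
def pvMinHead (eQ xQ : List (Int × Nat)) : Int :=
  match eQ, xQ with
  | (a, _) :: _, (b, _) :: _ => min a b
  | (a, _) :: _, [] => a
  | [], (b, _) :: _ => b
  | [], [] => 0

-- 'if tick is None or nxt > tick: tick = nxt; exit_prio = True'
def pvResolveB (eQ xQ : List (Int × Nat)) (tick? : Option Int) (prio : Bool) : Int × Bool :=
  match tick? with
  | none => (pvMinHead eQ xQ, true)
  | some t => if pvMinHead eQ xQ > t then (pvMinHead eQ xQ, true) else (t, prio)

-- B's while loop; the index pointers ei/xi are ported as consuming the heads of the lists.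
-- fuel is only a totality guard: the loop runs exactly eQ.length + xQ.length times.
def pvLoopB : Nat → List (Int × Nat) → List (Int × Nat) → Option Int → Bool →
    List Int → List Int
  | 0, _, _, _, _, res => res
  | f + 1, eQ, xQ, tick?, prio, res =>
    if eQ = [] ∧ xQ = [] then res
    else
      let tp := pvResolveB eQ xQ tick? prio
      let tick := tp.1
      let exitReady := match xQ with | (t, _) :: _ => decide (t ≤ tick) | [] => false
      let entryReady := match eQ with | (t, _) :: _ => decide (t ≤ tick) | [] => false
      if exitReady && (tp.2 || !entryReady) then
        match xQ with
        | (_, j) :: x' => pvLoopB f eQ x' (some (tick + 1)) true (res.set j tick)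
        | [] => res
      else
        match eQ with
        | (_, j) :: e' => pvLoopB f e' xQ (some (tick + 1)) false (res.set j tick)
        | [] => res

def solution_alt (times : List Int) (directions : List Int) : List Int :=
  let res := List.replicate times.length 0   -- [None]*n; every slot assigned before return
  let entry := PySem.List.sorted (pvSelectB times directions 0 true) (fun p => p.1) false
  let exits := PySem.List.sorted (pvSelectB times directions 0 false) (fun p => p.1) false
  pvLoopB (entry.length + exits.length) entry exits none true res

-- ===== PRECONDITION & SPEC =====
-- Pre_ excludes exactly the inputs on which Python A raises an IndexError: times == []
-- (arrTimes.pop(0) on the empty list) and directions shorter than times (directions[i]).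
def Pre_solution (times : List Int) (directions : List Int) : Prop :=
  times ≠ [] ∧ times.length ≤ directions.length
instance (times : List Int) (directions : List Int) : Decidable (Pre_solution times directions) := by
  unfold Pre_solution; infer_instance

def pvWitness_solution : List Int × List Int := ([4, 2, 2, 7], [0, 1, 0, 1])

-- On times == [] (any directions), A raises IndexError from arrTimes.pop(0) while B returns [].
def Raises_solution (times : List Int) (_directions : List Int) : Prop :=
  times = []
instance (times : List Int) (directions : List Int) : Decidable (Raises_solution times directions) := by
  unfold Raises_solution; infer_instance
def pvRaiseWitness_solution : List Int × List Int := ([], [])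
def pvRaiseWitnessOut_solution : List Int := []

def Spec_solution (times : List Int) (directions : List Int) (out : List Int) : Prop :=
  out = solution_alt times directions
instance (times : List Int) (directions : List Int) (out : List Int) : Decidable (Spec_solution times directions out) := by
  unfold Spec_solution; infer_instance

-- ===== CLAIM (what is proved, stated in full; the proofs are below) =====
def Claim_equal_solution : Prop := ∀ (times : List Int) (directions : List Int), Dom_solution times directions → Pre_solution times directions → Spec_solution times directions (solution times directions)

def Claim_raises_solution : Prop := (∀ (times : List Int) (directions : List Int), Dom_solution times directions → Raises_solution times directions → ¬ Pre_solution times directions) ∧ (Dom_solution (pvRaiseWitness_solution.1) (pvRaiseWitness_solution.2) ∧ Raises_solution (pvRaiseWitness_solution.1) (pvRaiseWitness_solution.2) ∧ solution_alt (pvRaiseWitness_solution.1) (pvRaiseWitness_solution.2) = pvRaiseWitnessOut_solution)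

-- ===== LEMMAS AND PROOFS =====

-- A's queue-building loop and B's two filtered comprehensions build the same two queues.
lemma pvBuildA_eq_select (ts dirs : List Int) (i : Nat) :
    pvBuildA ts dirs i = (pvSelectB ts dirs i true, pvSelectB ts dirs i false) := by
  induction ts generalizing i with
  | nil => rfl
  | cons t rest ih =>
    simp only [pvBuildA, pvSelectB, ih]
    split <;> rename_i h <;> simp at h ⊢ <;> simp [h]

lemma pvBuildA_fst_mem (ts dirs : List Int) (i : Nat) :
    (∀ p ∈ (pvBuildA ts dirs i).1, p.1 ∈ ts) ∧ (∀ p ∈ (pvBuildA ts dirs i).2, p.1 ∈ ts) := by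
  induction ts generalizing i with
  | nil => simp [pvBuildA]
  | cons t rest ih =>
    have ih1 := (ih (i + 1)).1
    have ih2 := (ih (i + 1)).2
    constructor <;> intro p hp <;>
      (simp only [pvBuildA] at hp; split at hp) <;>
      simp only [List.mem_cons] at hp ⊢
    · rcases hp with hp | hp
      · subst hp; simp
      · exact Or.inr (ih1 p hp)
    · exact Or.inr (ih1 p hp)
    · exact Or.inr (ih2 p hp)
    · rcases hp with hp | hp
      · subst hp; simp
      · exact Or.inr (ih2 p hp)

lemma pvBuildA_length (ts dirs : List Int) (i : Nat) :
    (pvBuildA ts dirs i).1.length + (pvBuildA ts dirs i).2.length = ts.length := by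
  induction ts generalizing i with
  | nil => rfl
  | cons t rest ih =>
    have := ih (i + 1)
    simp only [pvBuildA]
    split <;> simp only [List.length_cons] <;> omega

-- selA characterizations
lemma pvSelA_none {o : Bool} {eQ xQ : List (Int × Nat)} {tick : Int}
    (h : pvSelA o eQ xQ tick = none) :
    pvTryPop eQ tick = none ∧ pvTryPop xQ tick = none := by
  cases he : pvTryPop eQ tick with
  | none =>
    cases hx : pvTryPop xQ tick with
    | none => exact ⟨rfl, rfl⟩
    | some w =>
      obtain ⟨⟨tw, jw⟩, rw'⟩ := w
      exfalso; unfold pvSelA at h; cases o <;> rw [he, hx] at h <;> simp at h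
  | some w =>
    obtain ⟨⟨tw, jw⟩, rw'⟩ := w
    exfalso; unfold pvSelA at h
    cases o
    · cases hx : pvTryPop xQ tick with
      | none => rw [hx, he] at h; simp at h
      | some w2 => obtain ⟨⟨t2, j2⟩, r2⟩ := w2; rw [hx] at h; simp at h
    · rw [he] at h; simp at h

lemma pvSelA_some {o : Bool} {eQ xQ : List (Int × Nat)} {tick : Int}
    {j : Nat} {isOp : Bool} {e' x' : List (Int × Nat)}
    (h : pvSelA o eQ xQ tick = some (j, isOp, e', x')) :
    (isOp = true ∧ (∃ t, eQ = (t, j) :: e' ∧ t ≤ tick) ∧ x' = xQ ∧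
        (o = false → pvTryPop xQ tick = none))
    ∨ (isOp = false ∧ (∃ t, xQ = (t, j) :: x' ∧ t ≤ tick) ∧ e' = eQ ∧
        (o = true → pvTryPop eQ tick = none)) := by
  have hePop : ∀ (tv : Int) (jv : Nat) (rv : List (Int × Nat)),
      pvTryPop eQ tick = some ((tv, jv), rv) → eQ = (tv, jv) :: rv ∧ tv ≤ tick := by
    intro tv jv rv hv
    unfold pvTryPop at hv
    rcases eQ with _ | ⟨⟨t, jj⟩, r⟩
    · simp at hv
    · by_cases ht : t ≤ tick
      · simp [ht] at hv; obtain ⟨⟨h1, h2⟩, h3⟩ := hv; subst_vars; exact ⟨rfl, ht⟩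
      · simp [ht] at hv
  have hxPop : ∀ (tv : Int) (jv : Nat) (rv : List (Int × Nat)),
      pvTryPop xQ tick = some ((tv, jv), rv) → xQ = (tv, jv) :: rv ∧ tv ≤ tick := by
    intro tv jv rv hv
    unfold pvTryPop at hv
    rcases xQ with _ | ⟨⟨t, jj⟩, r⟩
    · simp at hv
    · by_cases ht : t ≤ tick
      · simp [ht] at hv; obtain ⟨⟨h1, h2⟩, h3⟩ := hv; subst_vars; exact ⟨rfl, ht⟩
      · simp [ht] at hv
  unfold pvSelA at h
  cases o <;> simp only [Bool.false_eq_true, reduceIte] at h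
  · -- currentState == 'open' is false: exit queue first
    cases hx : pvTryPop xQ tick with
    | some w =>
      obtain ⟨⟨tw, jw⟩, rw'⟩ := w
      rw [hx] at h
      simp only [Option.some.injEq, Prod.mk.injEq] at h
      obtain ⟨h1, h2, h3, h4⟩ := h
      subst_vars
      obtain ⟨hq, ht⟩ := hxPop _ _ _ hx
      exact Or.inr ⟨rfl, ⟨tw, hq, ht⟩, rfl, fun hh => nomatch hh⟩
    | none =>
      cases he : pvTryPop eQ tick with
      | none => rw [hx, he] at h; simp at h
      | some w =>
        obtain ⟨⟨tw, jw⟩, rw'⟩ := w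
        rw [hx, he] at h
        simp only [Option.some.injEq, Prod.mk.injEq] at h
        obtain ⟨h1, h2, h3, h4⟩ := h
        subst_vars
        obtain ⟨hq, ht⟩ := hePop _ _ _ he
        exact Or.inl ⟨rfl, ⟨tw, hq, ht⟩, rfl, fun _ => rfl⟩
  · -- gate open: entry queue first
    cases he : pvTryPop eQ tick with
    | some w =>
      obtain ⟨⟨tw, jw⟩, rw'⟩ := w
      rw [he] at h
      simp only [Option.some.injEq, Prod.mk.injEq] at h
      obtain ⟨h1, h2, h3, h4⟩ := h
      subst_vars
      obtain ⟨hq, ht⟩ := hePop _ _ _ he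
      exact Or.inl ⟨rfl, ⟨tw, hq, ht⟩, rfl, fun hh => nomatch hh⟩
    | none =>
      cases hx : pvTryPop xQ tick with
      | none => rw [he, hx] at h; simp at h
      | some w =>
        obtain ⟨⟨tw, jw⟩, rw'⟩ := w
        rw [he, hx] at h
        simp only [Option.some.injEq, Prod.mk.injEq] at h
        obtain ⟨h1, h2, h3, h4⟩ := h
        subst_vars
        obtain ⟨hq, ht⟩ := hxPop _ _ _ hx
        exact Or.inr ⟨rfl, ⟨tw, hq, ht⟩, rfl, fun _ => rfl⟩

lemma pvMinHead_le_exit (eQ : List (Int × Nat)) (t : Int) (j : Nat) (x' : List (Int × Nat)) :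
    pvMinHead eQ ((t, j) :: x') ≤ t := by
  rcases eQ with _ | ⟨⟨a, b⟩, r⟩ <;> simp [pvMinHead]

lemma pvMinHead_le_entry (t : Int) (j : Nat) (e' xQ : List (Int × Nat)) :
    pvMinHead ((t, j) :: e') xQ ≤ t := by
  rcases xQ with _ | ⟨⟨a, b⟩, r⟩ <;> simp [pvMinHead]

-- if both tryPops fail, the least queue head is strictly later than the clock, and it is
-- the time of some queued person
lemma pvMinHead_idle {eQ xQ : List (Int × Nat)} {tick : Int}
    (he : pvTryPop eQ tick = none) (hx : pvTryPop xQ tick = none)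
    (hne : ¬(eQ = [] ∧ xQ = [])) :
    tick < pvMinHead eQ xQ ∧ ∃ p ∈ eQ ++ xQ, p.1 = pvMinHead eQ xQ := by
  rcases eQ with _ | ⟨⟨t1, j1⟩, e'⟩ <;> rcases xQ with _ | ⟨⟨t2, j2⟩, x'⟩
  · exact absurd ⟨rfl, rfl⟩ hne
  · simp only [pvTryPop] at hx
    by_cases h2 : t2 ≤ tick
    · simp [h2] at hx
    · exact ⟨by simp [pvMinHead]; omega, ⟨(t2, j2), by simp, by simp [pvMinHead]⟩⟩
  · simp only [pvTryPop] at he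
    by_cases h1 : t1 ≤ tick
    · simp [h1] at he
    · exact ⟨by simp [pvMinHead]; omega, ⟨(t1, j1), by simp, by simp [pvMinHead]⟩⟩
  · simp only [pvTryPop] at he hx
    by_cases h1 : t1 ≤ tick
    · simp [h1] at he
    · by_cases h2 : t2 ≤ tick
      · simp [h2] at hx
      · refine ⟨by simp [pvMinHead]; omega, ?_⟩
        rcases le_total t1 t2 with h | h
        · exact ⟨(t1, j1), by simp, by simp [pvMinHead]; omega⟩
        · exact ⟨(t2, j2), by simp, by simp [pvMinHead]; omega⟩

-- pvLoopB only depends on (tick?, prio) through pvResolveB.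
lemma pvLoopB_congr (fuel : Nat) (eQ xQ : List (Int × Nat)) (t? t?' : Option Int)
    (p p' : Bool) (res : List Int)
    (h : pvResolveB eQ xQ t? p = pvResolveB eQ xQ t?' p') :
    pvLoopB fuel eQ xQ t? p res = pvLoopB fuel eQ xQ t?' p' res := by
  cases fuel with
  | zero => rfl
  | succ f => simp only [pvLoopB, h]

-- one B iteration that lets an exit through
lemma pvLoopB_step_exit (fB : Nat) (eQ : List (Int × Nat)) (t2 : Int) (j2 : Nat)
    (x' : List (Int × Nat)) (tick : Int) (prio : Bool) (res : List Int)
    (h2 : t2 ≤ tick)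
    (hmin : ¬ pvMinHead eQ ((t2, j2) :: x') > tick)
    (hcond : prio = true ∨ pvTryPop eQ tick = none) :
    pvLoopB (fB + 1) eQ ((t2, j2) :: x') (some tick) prio res
      = pvLoopB fB eQ x' (some (tick + 1)) true (res.set j2 tick) := by
  rw [pvLoopB]
  rw [if_neg (by simp)]
  simp only [pvResolveB, if_neg hmin]
  have hready : (match ((t2, j2) :: x' : List (Int × Nat)) with
      | (t, _) :: _ => decide (t ≤ tick) | [] => false) = true := by simp [h2]
  rcases hcond with rfl | hnone
  · simp [h2]
  · rcases eQ with _ | ⟨⟨t1, j1⟩, e'⟩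
    · simp [h2]
    · simp only [pvTryPop] at hnone
      by_cases h1 : t1 ≤ tick
      · simp [h1] at hnone
      · simp [h2, h1]

-- one B iteration that lets an entry through
lemma pvLoopB_step_entry (fB : Nat) (t1 : Int) (j1 : Nat) (e' xQ : List (Int × Nat))
    (tick : Int) (prio : Bool) (res : List Int)
    (h1 : t1 ≤ tick)
    (hmin : ¬ pvMinHead ((t1, j1) :: e') xQ > tick)
    (hcond : prio = false ∨ pvTryPop xQ tick = none) :
    pvLoopB (fB + 1) ((t1, j1) :: e') xQ (some tick) prio res
      = pvLoopB fB e' xQ (some (tick + 1)) false (res.set j1 tick) := by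
  rw [pvLoopB]
  rw [if_neg (by simp)]
  simp only [pvResolveB, if_neg hmin]
  rcases hcond with rfl | hnone
  · rcases xQ with _ | ⟨⟨t2, j2⟩, x'⟩
    · simp
    · simp [h1]
  · rcases xQ with _ | ⟨⟨t2, j2⟩, x'⟩
    · simp
    · simp only [pvTryPop] at hnone
      by_cases h2 : t2 ≤ tick
      · simp [h2] at hnone
      · simp [h1, h2]

-- Main simulation lemma: each process step of A matches one iteration of B, and A's idle
-- steps (state reset + clock jump through arrTimes) are absorbed by B's inline clock jump.
-- Invariant: arr is strictly increasing, and every queued time is either still in arr or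
-- already ≤ tick and ≤ every element of arr; so A never reaches the 'arrTimes exhausted,
-- tick += 1' branch, and its idle phase ends with tick = least queued head = B's jump target.
lemma pvLoopA_eq_pvLoopB (fuelA : Nat) :
    ∀ (fuelB : Nat) (eQ xQ : List (Int × Nat)) (arr : List Int) (tick : Int)
      (st : Option Bool) (processed total : Nat) (res : List Int),
      total = processed + eQ.length + xQ.length →
      total - processed + arr.length < fuelA →
      eQ.length + xQ.length ≤ fuelB →
      arr.Pairwise (· < ·) →
      (∀ p ∈ eQ ++ xQ, p.1 ∈ arr ∨ (p.1 ≤ tick ∧ ∀ b ∈ arr, p.1 ≤ b)) →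
      pvLoopA fuelA eQ xQ arr tick st processed total res
        = pvLoopB fuelB eQ xQ (some tick) (decide (st ≠ some true)) res := by
  induction fuelA with
  | zero => intro _ _ _ _ _ _ _ _ _ _ hA _ _ _; omega
  | succ fA ih =>
    intro fuelB eQ xQ arr tick st processed total res hTot hA hB hArr hInv
    by_cases hpt : processed < total
    · have hneQ : ¬(eQ = [] ∧ xQ = []) := by
        rintro ⟨rfl, rfl⟩; simp at hTot; omega
      obtain ⟨fB, rfl⟩ : ∃ fB, fuelB = fB + 1 := by
        cases fuelB with
        | zero =>
          exfalso
          rcases eQ with _ | ⟨p, e'⟩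
          · rcases xQ with _ | ⟨q, x'⟩
            · exact hneQ ⟨rfl, rfl⟩
            · simp at hB
          · simp at hB
        | succ fB => exact ⟨fB, rfl⟩
      rw [pvLoopA]
      rw [if_pos hpt]
      cases hsel : pvSelA (st == some true) eQ xQ tick with
      | some v =>
        obtain ⟨j, isOp, e', x'⟩ := v
        rcases pvSelA_some hsel with ⟨rfl, ⟨t, rfl, ht⟩, rfl, hside⟩
                                   | ⟨rfl, ⟨t, rfl, ht⟩, rfl, hside⟩
        · -- an entry crosses: one matching B iteration
          rw [pvLoopB_step_entry fB t j e' x' tick (decide (st ≠ some true)) res ht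
            (by have := pvMinHead_le_entry t j e' x'; omega)
            (by by_cases hop : st = some true
                · left; simp [hop]
                · right; exact hside (by simp [hop]))]
          exact ih fB e' x' arr (tick + 1) (some true) (processed + 1) total
            (res.set j tick) (by simp at hTot ⊢; omega) (by omega)
            (by simp at hB ⊢; omega) hArr
            (by intro p hp
                rcases hInv p (by simp at hp ⊢; tauto) with hm | ⟨hle, hbnd⟩
                · exact Or.inl hm
                · exact Or.inr ⟨by omega, hbnd⟩)
        · -- an exit crosses: one matching B iteration
          rw [pvLoopB_step_exit fB e' t j x' tick (decide (st ≠ some true)) res ht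
            (by have := pvMinHead_le_exit e' t j x'; omega)
            (by by_cases hop : st = some true
                · right; exact hside (by simp [hop])
                · left; simp [hop])]
          exact ih fB e' x' arr (tick + 1) (some false) (processed + 1) total
            (res.set j tick) (by simp at hTot ⊢; omega) (by omega)
            (by simp at hB ⊢; omega) hArr
            (by intro p hp
                rcases hInv p (by simp at hp ⊢; tauto) with hm | ⟨hle, hbnd⟩
                · exact Or.inl hm
                · exact Or.inr ⟨by omega, hbnd⟩)
      | none =>
        -- idle: the gate state resets and the clock jumps along arrTimes
        obtain ⟨he, hx⟩ := pvSelA_none hsel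
        obtain ⟨hgt, p0, hp0mem, hp0⟩ := pvMinHead_idle he hx hneQ
        have hnxtarr : pvMinHead eQ xQ ∈ arr := by
          rcases hInv p0 hp0mem with hm | ⟨hle, _⟩
          · rwa [hp0] at hm
          · omega
        rcases arr with _ | ⟨a, arest⟩
        · simp at hnxtarr
        · have hale : a ≤ pvMinHead eQ xQ := by
            rcases List.mem_cons.1 hnxtarr with hh | hh
            · omega
            · exact le_of_lt ((List.pairwise_cons.1 hArr).1 _ hh)
          have hjump : pvLoopB (fB + 1) eQ xQ (some tick) (decide (st ≠ some true)) res
              = pvLoopB (fB + 1) eQ xQ (some a) true res := by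
            apply pvLoopB_congr
            simp only [pvResolveB]
            rw [if_pos hgt]
            by_cases haeq : a = pvMinHead eQ xQ
            · rw [if_neg (by omega)]; simp [haeq]
            · rw [if_pos (by omega)]
          rw [hjump]
          exact ih (fB + 1) eQ xQ arest a none processed total res hTot
            (by simp at hA ⊢; omega) hB (List.pairwise_cons.1 hArr).2
            (by intro p hp
                rcases hInv p hp with hm | ⟨hle, hbnd⟩
                · rcases List.mem_cons.1 hm with hh | hh
                  · exact Or.inr ⟨le_of_eq hh, fun b hb =>
                      le_of_lt (hh ▸ (List.pairwise_cons.1 hArr).1 b hb)⟩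
                  · exact Or.inl hh
                · exact Or.inr ⟨hbnd a (by simp), fun b hb => hbnd b (by simp [hb])⟩)
    · -- processed == total: the loop is over and both queues are empty
      have he : eQ = [] := by
        rcases eQ with _ | ⟨p, e'⟩
        · rfl
        · exfalso; simp at hTot; omega
      have hx : xQ = [] := by
        rcases xQ with _ | ⟨p, x'⟩
        · rfl
        · exfalso; simp at hTot; omega
      subst he hx
      rw [pvLoopA]
      rw [if_neg hpt]
      cases fuelB with
      | zero => rfl
      | succ fB => rw [pvLoopB]; rw [if_pos ⟨rfl, rfl⟩]

lemma pvMinHead_mem {eQ xQ : List (Int × Nat)} (hne : ¬(eQ = [] ∧ xQ = [])) :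
    ∃ p ∈ eQ ++ xQ, p.1 = pvMinHead eQ xQ := by
  rcases eQ with _ | ⟨⟨t1, j1⟩, e'⟩ <;> rcases xQ with _ | ⟨⟨t2, j2⟩, x'⟩
  · exact absurd ⟨rfl, rfl⟩ hne
  · exact ⟨(t2, j2), by simp, by simp [pvMinHead]⟩
  · exact ⟨(t1, j1), by simp, by simp [pvMinHead]⟩
  · rcases le_total t1 t2 with h | h
    · exact ⟨(t1, j1), by simp, by simp [pvMinHead]; omega⟩
    · exact ⟨(t2, j2), by simp, by simp [pvMinHead]; omega⟩

theorem solution_spec : Claim_equal_solution := by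
  intro times directions _ hPre
  unfold Spec_solution
  simp only [solution, solution_alt, pvBuildA_eq_select]
  split
  next harr =>
    exfalso
    rcases times with _ | ⟨t0, ts⟩
    · exact hPre.1 rfl
    · have ht0 : t0 ∈ PySem.List.sorted (PySem.Set.ofList (t0 :: ts)) (fun x => x) false := by
        rw [PySem.List.mem_sorted]
        exact (PySem.Set.mem_ofList _ _).2 (by simp)
      rw [harr] at ht0
      simp at ht0
  next a arest harr =>
    have hPW : (a :: arest).Pairwise (· < ·) := by
      rw [← harr]; exact PySem.List.sorted_ofList_pairwise_lt times
    have hmem : ∀ y : Int, y ∈ times → y ∈ a :: arest := by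
      intro y hy
      rw [← harr, PySem.List.mem_sorted]
      exact (PySem.Set.mem_ofList _ _).2 hy
    have hfst := pvBuildA_fst_mem times directions 0
    rw [pvBuildA_eq_select] at hfst
    have hblen := pvBuildA_length times directions 0
    rw [pvBuildA_eq_select] at hblen
    simp only at hfst hblen
    have hlen : (PySem.List.sorted (pvSelectB times directions 0 true) (fun p => p.1) false).length
        + (PySem.List.sorted (pvSelectB times directions 0 false) (fun p => p.1) false).length
        = times.length := by
      simp only [PySem.List.length_sorted]; exact hblen
    have hqmem : ∀ p ∈ (PySem.List.sorted (pvSelectB times directions 0 true) (fun p => p.1) false)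
        ++ (PySem.List.sorted (pvSelectB times directions 0 false) (fun p => p.1) false),
        p.1 ∈ a :: arest := by
      intro p hp
      rcases List.mem_append.1 hp with hp | hp <;> rw [PySem.List.mem_sorted] at hp
      · exact hmem _ (hfst.1 p hp)
      · exact hmem _ (hfst.2 p hp)
    rw [pvLoopA_eq_pvLoopB (times.length + arest.length + 1)
      ((PySem.List.sorted (pvSelectB times directions 0 true) (fun p => p.1) false).length
        + (PySem.List.sorted (pvSelectB times directions 0 false) (fun p => p.1) false).length)
      _ _ arest a none 0 times.length (List.replicate times.length 0)
      (by omega) (by omega) (le_refl _) (List.pairwise_cons.1 hPW).2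
      (by intro p hp
          rcases List.mem_cons.1 (hqmem p hp) with hh | hh
          · exact Or.inr ⟨le_of_eq hh, fun b hb =>
              le_of_lt (hh ▸ (List.pairwise_cons.1 hPW).1 b hb)⟩
          · exact Or.inl hh)]
    -- both initial clocks resolve to the least queued time
    apply pvLoopB_congr
    have hneQ : ¬((PySem.List.sorted (pvSelectB times directions 0 true) (fun p => p.1) false) = []
        ∧ (PySem.List.sorted (pvSelectB times directions 0 false) (fun p => p.1) false) = []) := by
      rintro ⟨h1, h2⟩
      rw [h1, h2] at hlen
      simp at hlen
      exact hPre.1 (List.length_eq_zero_iff.1 hlen.symm)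
    obtain ⟨p0, hp0mem, hp0⟩ := pvMinHead_mem hneQ
    have hale : a ≤ pvMinHead
        (PySem.List.sorted (pvSelectB times directions 0 true) (fun p => p.1) false)
        (PySem.List.sorted (pvSelectB times directions 0 false) (fun p => p.1) false) := by
      rcases List.mem_cons.1 (hp0 ▸ hqmem p0 hp0mem) with hh | hh
      · omega
      · exact le_of_lt ((List.pairwise_cons.1 hPW).1 _ hh)
    simp only [pvResolveB]
    rcases eq_or_lt_of_le hale with heq | hlt
    · rw [if_neg (by omega)]
      simp [heq]
    · rw [if_pos (by omega)]

-- ===== VERDICT (by name: the statement is the Claim_ definition above) =====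
theorem solution_raises : Claim_raises_solution := by
  unfold Claim_raises_solution
  refine ⟨fun times directions _ hR hP => hP.1 hR, by decide, by decide, by decide⟩

-- self-check: the crash-fix witness really is inside Raises_ and B really returns [] there
lemma pvRaiseWitness_ok : Raises_solution pvRaiseWitness_solution.1 pvRaiseWitness_solution.2 ∧
    solution_alt pvRaiseWitness_solution.1 pvRaiseWitness_solution.2 = pvRaiseWitnessOut_solution :=
  solution_raises.2.2
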